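-- pv_equiv track=rewrite | github.com/dcronin05/resources | files/python/week_3/midTermP7.py | satisfiesF
-- ===== SOURCE A (Python) =====
-- def satisfiesF(L):
--     """
--     Assumes L is a list of strings
--     Assume function f is already defined for you and it maps a string to a Boolean
--     Mutates L such that it contains all of the strings, s, originally in L such
--         that f(s) returns True, and no other elements. Remaining elements in L
--         should be in the same order.
--     Returns the length of L after mutation
--     """
--
--     adj = 0
--
--     while True:
--         if len(L) == adj:
--             break
--
--         for i in range(adj, len(L), 1):
--             if not f(L[i]):
--                 L.pop(adj)
--                 break
--             else:
--                 adj += 1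
--                 break
--
--     return len(L)
--
-- def f(s):
--     return 'abc' in s
-- ===== SOURCE B (Python) =====
-- def satisfiesF(L):
--     # One-pass in-place two-pointer compaction (O(n)) instead of repeated pop-based deletion.
--     w = 0
--     for i in range(len(L)):
--         if f(L[i]):
--             L[w] = L[i]
--             w += 1
--     del L[w:]
--     return w
--
-- def f(s):
--     return 'abc' in s
-- ===== Notes on version B (the rewrite author's own statement) =====
-- stated objective: faster
-- what changed: Replaces the restart-scan loop with pop(adj) deletions by a single forward pass with a write pointer that compacts kept elements in place and truncates once.
import Mathlib
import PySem

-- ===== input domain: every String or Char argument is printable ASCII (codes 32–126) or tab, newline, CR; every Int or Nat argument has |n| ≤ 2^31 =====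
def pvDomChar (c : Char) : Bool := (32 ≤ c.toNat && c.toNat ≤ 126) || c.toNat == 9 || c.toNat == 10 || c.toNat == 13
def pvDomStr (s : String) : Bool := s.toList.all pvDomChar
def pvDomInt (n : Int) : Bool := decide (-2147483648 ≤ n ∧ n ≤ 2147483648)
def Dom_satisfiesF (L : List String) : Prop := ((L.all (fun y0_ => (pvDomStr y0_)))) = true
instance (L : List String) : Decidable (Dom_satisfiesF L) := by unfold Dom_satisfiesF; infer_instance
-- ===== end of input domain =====

-- B replaces A's restart-scan with pop(adj) deletions (O(n^2)) by a single forward write-pointer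
-- compaction pass (O(n)); both mutate L in Python — the equivalence proved here is about the RETURN value.

-- f(s) = 'abc' in s
def pvF (s : String) : Bool := PySem.Str.isIn "abc" s

-- ===== PORT A =====
-- the while-True loop of A: at each round, if adj = len(L) stop; else the inner 'for' breaks
-- on its first iteration i = adj, either popping L[adj] or incrementing adj.
-- (the '≤' guard only makes the recursion total; A's own invariant gives adj ≤ len(L), where it is '=')
def loopA (L : List String) (adj : Nat) : List String :=
  if L.length ≤ adj then L
  else if pvF (L.getD adj "") then loopA L (adj + 1)
  else loopA (L.eraseIdx adj) adj
termination_by L.length - adj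
decreasing_by
  · omega
  · have : (L.eraseIdx adj).length = L.length - 1 := by
      rw [List.length_eraseIdx]; simp; omega
    omega

def satisfiesF (L : List String) : Int := ((loopA L 0).length : Int)

-- ===== PORT B =====
-- B's single pass: w counts (and in Python also writes) kept elements; returns w.
def satisfiesF_alt (L : List String) : Int :=
  L.foldl (fun w s => if pvF s then w + 1 else w) 0

-- ===== PRECONDITION & SPEC =====
def Spec_satisfiesF (L : List String) (out : Int) : Prop := out = satisfiesF_alt L
instance (L : List String) (out : Int) : Decidable (Spec_satisfiesF L out) := by unfold Spec_satisfiesF; infer_instance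

-- ===== CLAIM (what is proved, stated in full; the proofs are below) =====
def Claim_equal_satisfiesF : Prop := ∀ (L : List String), Dom_satisfiesF L → Spec_satisfiesF L (satisfiesF L)

-- ===== LEMMAS AND PROOFS =====

-- A's loop leaves the first adj elements alone and filters the rest.
theorem loopA_eq (n : Nat) : ∀ (L : List String) (adj : Nat), L.length - adj = n → adj ≤ L.length →
    loopA L adj = L.take adj ++ (L.drop adj).filter pvF := by
  induction n with
  | zero =>
    intro L adj h hle
    have : L.length = adj := by omega
    unfold loopA
    subst this
    simp
  | succ n ih =>
    intro L adj h hle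
    have hlt : adj < L.length := by omega
    unfold loopA
    rw [if_neg (by omega)]
    have hget : L.getD adj "" = L[adj] := List.getD_eq_getElem L "" hlt
    rw [hget]
    have hdrop : L[adj] :: L.drop (adj + 1) = L.drop adj := List.getElem_cons_drop (as := L) (h := hlt)
    by_cases hf : pvF L[adj]
    · rw [if_pos hf, ih L (adj + 1) (by omega) (by omega)]
      rw [← hdrop, List.filter_cons_of_pos hf, List.take_succ_eq_append_getElem hlt]
      simp only [List.append_assoc, List.cons_append, List.nil_append]
    · rw [if_neg hf]
      have hE : L.eraseIdx adj = L.take adj ++ L.drop (adj + 1) :=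
        List.eraseIdx_eq_take_drop_succ L adj
      have hlen : (L.eraseIdx adj).length = L.length - 1 := by
        rw [List.length_eraseIdx]; simp [hlt]
      rw [ih (L.eraseIdx adj) adj (by omega) (by omega), hE]
      have htk : adj ≤ (L.take adj).length := by simp; omega
      rw [List.take_append_of_le_length htk, List.drop_append_of_le_length htk]
      simp [List.take_take]
      rw [← hdrop, List.filter_cons_of_neg hf]

-- B's fold counts the kept elements.
theorem foldB_eq : ∀ (L : List String) (a : Int),
    L.foldl (fun w s => if pvF s then w + 1 else w) a = a + ((L.filter pvF).length : Int) := by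
  intro L
  induction L with
  | nil => simp
  | cons x xs ih =>
    intro a
    by_cases hf : pvF x
    · simp [List.foldl_cons, hf, ih]; ring
    · simp [List.foldl_cons, hf, ih]

-- ===== VERDICT (by name: the statement is the Claim_ definition above) =====
theorem satisfiesF_spec : Claim_equal_satisfiesF := by
  intro L _
  unfold Spec_satisfiesF satisfiesF satisfiesF_alt
  rw [loopA_eq L.length L 0 (by omega) (by omega), foldB_eq]
  simp
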